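-- pv_equiv track=rewrite | github.com/ParkHeechung/ProjectEuler | problem038.py | check_digit_duplication
-- ===== SOURCE A (Python) =====
-- def check_digit_duplication(number_str, digits):
--     digits = set(digits)
--     has_duplicated_digits = False
--     for char in number_str:
--         if char in digits and char != "0":
--             has_duplicated_digits = True
--             break
--         else:
--             digits.add(char)
--     return has_duplicated_digits
-- ===== SOURCE B (Python) =====
-- def check_digit_duplication(number_str, digits):
--     seen = set(digits)
--     chars = list(number_str)
--     return any(c != "0" and (c in seen or chars.count(c) > 1) for c in chars)
-- ===== Notes on version B (the rewrite author's own statement) =====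
-- stated objective: idiomatic
-- what changed: Replaces A's stateful accumulate-into-a-set-and-break loop with a stateless per-character any(): a nonzero char duplicates iff it is in set(digits) or occurs at least twice in number_str.
import Mathlib
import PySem

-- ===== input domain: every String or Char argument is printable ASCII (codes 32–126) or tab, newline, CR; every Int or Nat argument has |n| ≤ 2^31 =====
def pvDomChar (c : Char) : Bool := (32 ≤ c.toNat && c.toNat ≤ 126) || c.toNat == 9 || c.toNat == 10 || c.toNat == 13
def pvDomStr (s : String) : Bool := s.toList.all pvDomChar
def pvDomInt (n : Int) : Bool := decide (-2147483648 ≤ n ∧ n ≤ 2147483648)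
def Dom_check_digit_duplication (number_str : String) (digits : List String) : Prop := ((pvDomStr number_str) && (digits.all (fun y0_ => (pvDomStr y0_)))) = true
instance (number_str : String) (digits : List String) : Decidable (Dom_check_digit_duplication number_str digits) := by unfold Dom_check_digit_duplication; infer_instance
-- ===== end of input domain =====

-- B replaces A's accumulate-into-a-set-and-break loop with a stateless per-character
-- membership/count test (idiomatic any()); equivalence of return values is proved below.


-- ===== PORT A =====
-- the for-loop with break: returns true at the first char in the (growing) set and ≠ "0"
def dupLoop (ds : PySem.Set String) : List Char → Bool
  | [] => false
  | c :: rest =>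
    if PySem.Set.contains ds (String.ofList [c]) && (String.ofList [c] != "0") then true
    else dupLoop (PySem.Set.add ds (String.ofList [c])) rest

def check_digit_duplication (number_str : String) (digits : List String) : Bool :=
  dupLoop (PySem.Set.ofList digits) number_str.toList

-- ===== PORT B =====
def check_digit_duplication_alt (number_str : String) (digits : List String) : Bool :=
  let seen := PySem.Set.ofList digits
  let chars := number_str.toList
  chars.any (fun c =>
    (String.ofList [c] != "0") &&
      (PySem.Set.contains seen (String.ofList [c]) || decide (1 < PySem.List.count chars c)))

-- ===== PRECONDITION & SPEC =====
def Spec_check_digit_duplication (number_str : String) (digits : List String) (out : Bool) : Prop := out = check_digit_duplication_alt number_str digits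
instance (number_str : String) (digits : List String) (out : Bool) : Decidable (Spec_check_digit_duplication number_str digits out) := by unfold Spec_check_digit_duplication; infer_instance

-- ===== CLAIM (what is proved, stated in full; the proofs are below) =====
def Claim_equal_check_digit_duplication : Prop := ∀ (number_str : String) (digits : List String), Dom_check_digit_duplication number_str digits → Spec_check_digit_duplication number_str digits (check_digit_duplication number_str digits)

-- ===== LEMMAS AND PROOFS =====

-- A's loop fires iff some char of l is nonzero and is in ds or occurs twice in l
theorem dupLoop_iff (l : List Char) : ∀ ds : PySem.Set String,
    (dupLoop ds l = true ↔
      ∃ c ∈ l, String.ofList [c] ≠ "0" ∧ (String.ofList [c] ∈ ds ∨ 1 < l.count c)) := by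
  induction l with
  | nil => intro ds; simp [dupLoop]
  | cons c rest ih =>
    intro ds
    by_cases h : String.ofList [c] ∈ ds ∧ String.ofList [c] ≠ "0"
    · have hc : PySem.Set.contains ds (String.ofList [c]) = true := (PySem.Set.contains_iff _ _).mpr h.1
      rw [dupLoop, hc]
      simp [h.2]
      exact Or.inl (Or.inl h.1)
    · have hcond : (PySem.Set.contains ds (String.ofList [c]) && (String.ofList [c] != "0")) = false := by
        rcases not_and_or.mp h with h1 | h1
        · simp [h1]
        · simp [not_not.mp (by simpa using h1)]
      rw [dupLoop, hcond]
      simp only [Bool.false_eq_true, if_false]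
      rw [ih]
      constructor
      · rintro ⟨d, hd, hd0, hmem⟩
        rcases hmem with hmem | hcnt
        · rcases (PySem.Set.mem_add _ _ _).mp hmem with hds | hdc
          · exact ⟨d, List.mem_cons_of_mem _ hd, hd0, Or.inl hds⟩
          · have hdc' : d = c := by
              have h2 := congrArg String.toList hdc
              simp at h2
              exact h2
            subst hdc'
            refine ⟨d, List.mem_cons_of_mem _ hd, hd0, Or.inr ?_⟩
            have : 0 < rest.count d := List.count_pos_iff.mpr hd
            simp [List.count_cons_self]
            omega
        · refine ⟨d, List.mem_cons_of_mem _ hd, hd0, Or.inr ?_⟩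
          calc 1 < rest.count d := hcnt
            _ ≤ (c :: rest).count d := by
                by_cases hdc : d = c <;> simp [hdc, List.count_cons]
      · rintro ⟨d, hd, hd0, hmem⟩
        rcases List.mem_cons.mp hd with hdc | hdr
        · subst hdc
          have hnds : String.ofList [d] ∉ ds := by
            intro hmemds; exact h ⟨hmemds, hd0⟩
          have hcnt : 1 < (d :: rest).count d := by
            rcases hmem with h' | h'
            · exact absurd h' hnds
            · exact h'
          have hdr : d ∈ rest := by
            rw [List.count_cons_self] at hcnt
            exact List.count_pos_iff.mp (by omega)
          exact ⟨d, hdr, hd0, Or.inl ((PySem.Set.mem_add _ _ _).mpr (Or.inr rfl))⟩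
        · rcases hmem with hds | hcnt
          · exact ⟨d, hdr, hd0, Or.inl ((PySem.Set.mem_add _ _ _).mpr (Or.inl hds))⟩
          · by_cases hdc : d = c
            · subst hdc
              exact ⟨d, hdr, hd0, Or.inl ((PySem.Set.mem_add _ _ _).mpr (Or.inr rfl))⟩
            · refine ⟨d, hdr, hd0, Or.inr ?_⟩
              simpa [List.count_cons, (Ne.symm hdc : c ≠ d)] using hcnt

-- ===== VERDICT (by name: the statement is the Claim_ definition above) =====
theorem check_digit_duplication_spec : Claim_equal_check_digit_duplication := by
  intro number_str digits _
  unfold Spec_check_digit_duplication check_digit_duplication check_digit_duplication_alt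
  rw [Bool.eq_iff_iff, dupLoop_iff]
  simp [List.any_eq_true, PySem.List.count_eq]
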